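-- pv_equiv track=rewrite | github.com/CalebSussman/accordi | backend/layout_generator.py | get_pitch_class_color
-- ===== SOURCE A (Python) =====
-- PITCH_CLASS_COLORS = {
--     0: "white",    # C
--     1: "dark",     # C#/Db
--     2: "blue",     # D
--     3: "dark",     # D#/Eb
--     4: "green",    # E
--     5: "yellow",   # F
--     6: "orange",   # F#/Gb
--     7: "red",      # G
--     8: "gray",     # G#/Ab
--     9: "purple",   # A
--     10: "purple",  # A#/Bb
--     11: "teal"     # B
-- }
--
-- NOTE_NAMES = ['C', 'C#', 'D', 'D#', 'E', 'F', 'F#', 'G', 'G#', 'A', 'A#', 'B']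
--
-- ENHARMONIC_MAP = {
--     'C#': 'Db', 'D#': 'Eb', 'F#': 'Gb', 'G#': 'Ab', 'A#': 'Bb',
--     'E': 'Fb', 'B': 'Cb', 'C': 'B#', 'F': 'E#'
-- }
--
-- def get_pitch_class_color(note: str) -> str:
--     """
--     Get color for a note based on its pitch class.
--
--     Args:
--         note: Note name (e.g., 'C', 'F#', 'Bb')
--
--     Returns:
--         Color string
--     """
--     # Extract just the note name without octave
--     note_base = note.rstrip('0123456789')
--
--     # Get MIDI pitch class (0-11)
--     try:
--         pitch_class = NOTE_NAMES.index(note_base)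
--     except ValueError:
--         # Try enharmonic equivalent
--         for original, enharmonic in ENHARMONIC_MAP.items():
--             if note_base == enharmonic:
--                 pitch_class = NOTE_NAMES.index(original)
--                 break
--         else:
--             pitch_class = 0  # Default to C
--
--     return PITCH_CLASS_COLORS.get(pitch_class, "white")
-- ===== SOURCE B (Python) =====
-- # Precomputed flat table: every recognized spelling (plain or enharmonic) -> color.
-- NAME_TO_COLOR = {
--     'C': 'white', 'C#': 'dark', 'D': 'blue', 'D#': 'dark', 'E': 'green',
--     'F': 'yellow', 'F#': 'orange', 'G': 'red', 'G#': 'gray', 'A': 'purple',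
--     'A#': 'purple', 'B': 'teal',
--     'Db': 'dark', 'Eb': 'dark', 'Gb': 'orange', 'Ab': 'gray', 'Bb': 'purple',
--     'Fb': 'green', 'Cb': 'teal', 'B#': 'white', 'E#': 'yellow',
-- }
--
-- def get_pitch_class_color(note: str) -> str:
--     return NAME_TO_COLOR.get(note.rstrip('0123456789'), 'white')
-- ===== Notes on version B (the rewrite author's own statement) =====
-- stated objective: simpler
-- what changed: Replaces the try/except NOTE_NAMES.index search plus the fallback linear scan over ENHARMONIC_MAP with a single precomputed flat name->color table and one dict lookup.
import Mathlib
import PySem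

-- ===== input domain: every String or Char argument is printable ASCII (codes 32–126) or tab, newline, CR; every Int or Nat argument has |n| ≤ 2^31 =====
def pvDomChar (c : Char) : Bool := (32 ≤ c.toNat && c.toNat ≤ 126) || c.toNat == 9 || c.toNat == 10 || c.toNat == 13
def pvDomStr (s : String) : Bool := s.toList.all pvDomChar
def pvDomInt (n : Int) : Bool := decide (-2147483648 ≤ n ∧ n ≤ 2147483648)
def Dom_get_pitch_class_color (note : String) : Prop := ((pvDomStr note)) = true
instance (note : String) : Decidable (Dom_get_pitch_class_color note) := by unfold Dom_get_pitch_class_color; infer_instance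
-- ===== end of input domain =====

-- B replaces A's two-stage search (try NOTE_NAMES.index, then a scan over ENHARMONIC_MAP) with one precomputed flat name→color table; objective: simpler.

-- exact hand port of s.rstrip('0123456789') (both Pythons call it): drop trailing characters from the digit set
def stripTrailingDigits (s : String) : String :=
  String.mk ((s.toList.reverse.dropWhile (fun c => c ∈ ['0','1','2','3','4','5','6','7','8','9'])).reverse)

-- ===== PORT A =====
def pitchClassColors : PySem.Dict Int String :=
  PySem.Dict.mk [(0,"white"),(1,"dark"),(2,"blue"),(3,"dark"),(4,"green"),(5,"yellow"),
                 (6,"orange"),(7,"red"),(8,"gray"),(9,"purple"),(10,"purple"),(11,"teal")]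

def noteNames : List String := ["C","C#","D","D#","E","F","F#","G","G#","A","A#","B"]

def enharmonicMap : PySem.Dict String String :=
  PySem.Dict.mk [("C#","Db"),("D#","Eb"),("F#","Gb"),("G#","Ab"),("A#","Bb"),
                 ("E","Fb"),("B","Cb"),("C","B#"),("F","E#")]

def get_pitch_class_color (note : String) : String :=
  let noteBase := stripTrailingDigits note
  let pitchClass : Int :=
    match PySem.List.index? noteNames noteBase with
    | some i => (i : Int)
    | none =>
      -- for original, enharmonic in ENHARMONIC_MAP.items(): first match wins, else 0
      match enharmonicMap.items.find? (fun p => noteBase == p.2) with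
      | some p => ((PySem.List.index? noteNames p.1).getD 0 : Int)  -- original is always in NOTE_NAMES, so index? never raises here
      | none => 0
  pitchClassColors.getD pitchClass "white"

-- ===== PORT B =====
def nameToColor : PySem.Dict String String :=
  PySem.Dict.mk [("C","white"),("C#","dark"),("D","blue"),("D#","dark"),("E","green"),
                 ("F","yellow"),("F#","orange"),("G","red"),("G#","gray"),("A","purple"),
                 ("A#","purple"),("B","teal"),
                 ("Db","dark"),("Eb","dark"),("Gb","orange"),("Ab","gray"),("Bb","purple"),
                 ("Fb","green"),("Cb","teal"),("B#","white"),("E#","yellow")]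

def get_pitch_class_color_alt (note : String) : String :=
  nameToColor.getD (stripTrailingDigits note) "white"

-- ===== PRECONDITION & SPEC =====
def Spec_get_pitch_class_color (note : String) (out : String) : Prop := out = get_pitch_class_color_alt note
instance (note : String) (out : String) : Decidable (Spec_get_pitch_class_color note out) := by unfold Spec_get_pitch_class_color; infer_instance

-- ===== CLAIM (what is proved, stated in full; the proofs are below) =====
def Claim_equal_get_pitch_class_color : Prop := ∀ (note : String), Dom_get_pitch_class_color note → Spec_get_pitch_class_color note (get_pitch_class_color note)

-- ===== LEMMAS AND PROOFS =====
-- both results are a function of the stripped base; they agree on every base string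
lemma core (b : String) :
    pitchClassColors.getD
      (match PySem.List.index? noteNames b with
       | some i => (i : Int)
       | none =>
         match enharmonicMap.items.find? (fun p => b == p.2) with
         | some p => ((PySem.List.index? noteNames p.1).getD 0 : Int)
         | none => 0) "white"
      = nameToColor.getD b "white" := by
  by_cases h : b ∈ ["C","C#","D","D#","E","F","F#","G","G#","A","A#","B","Db","Eb","Gb","Ab","Bb","Fb","Cb","B#","E#"]
  · fin_cases h <;> rfl
  · simp only [List.mem_cons, not_or, List.not_mem_nil] at h
    obtain ⟨h1,h2,h3,h4,h5,h6,h7,h8,h9,h10,h11,h12,h13,h14,h15,h16,h17,h18,h19,h20,h21,-⟩ := h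
    have e1 : (b == "C") = false := by simp [h1]
    have f1 : ("C" == b) = false := by simp [Ne.symm h1]
    have e2 : (b == "C#") = false := by simp [h2]
    have f2 : ("C#" == b) = false := by simp [Ne.symm h2]
    have e3 : (b == "D") = false := by simp [h3]
    have f3 : ("D" == b) = false := by simp [Ne.symm h3]
    have e4 : (b == "D#") = false := by simp [h4]
    have f4 : ("D#" == b) = false := by simp [Ne.symm h4]
    have e5 : (b == "E") = false := by simp [h5]
    have f5 : ("E" == b) = false := by simp [Ne.symm h5]
    have e6 : (b == "F") = false := by simp [h6]
    have f6 : ("F" == b) = false := by simp [Ne.symm h6]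
    have e7 : (b == "F#") = false := by simp [h7]
    have f7 : ("F#" == b) = false := by simp [Ne.symm h7]
    have e8 : (b == "G") = false := by simp [h8]
    have f8 : ("G" == b) = false := by simp [Ne.symm h8]
    have e9 : (b == "G#") = false := by simp [h9]
    have f9 : ("G#" == b) = false := by simp [Ne.symm h9]
    have e10 : (b == "A") = false := by simp [h10]
    have f10 : ("A" == b) = false := by simp [Ne.symm h10]
    have e11 : (b == "A#") = false := by simp [h11]
    have f11 : ("A#" == b) = false := by simp [Ne.symm h11]
    have e12 : (b == "B") = false := by simp [h12]
    have f12 : ("B" == b) = false := by simp [Ne.symm h12]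
    have e13 : (b == "Db") = false := by simp [h13]
    have f13 : ("Db" == b) = false := by simp [Ne.symm h13]
    have e14 : (b == "Eb") = false := by simp [h14]
    have f14 : ("Eb" == b) = false := by simp [Ne.symm h14]
    have e15 : (b == "Gb") = false := by simp [h15]
    have f15 : ("Gb" == b) = false := by simp [Ne.symm h15]
    have e16 : (b == "Ab") = false := by simp [h16]
    have f16 : ("Ab" == b) = false := by simp [Ne.symm h16]
    have e17 : (b == "Bb") = false := by simp [h17]
    have f17 : ("Bb" == b) = false := by simp [Ne.symm h17]
    have e18 : (b == "Fb") = false := by simp [h18]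
    have f18 : ("Fb" == b) = false := by simp [Ne.symm h18]
    have e19 : (b == "Cb") = false := by simp [h19]
    have f19 : ("Cb" == b) = false := by simp [Ne.symm h19]
    have e20 : (b == "B#") = false := by simp [h20]
    have f20 : ("B#" == b) = false := by simp [Ne.symm h20]
    have e21 : (b == "E#") = false := by simp [h21]
    have f21 : ("E#" == b) = false := by simp [Ne.symm h21]
    simp [noteNames, enharmonicMap, nameToColor, PySem.List.index?_eq_idxOf?,
      PySem.Dict.getD_eq_get?_getD, PySem.Dict.get?_mk_cons,
      pitchClassColors, PySem.Dict.get?, List.idxOf?, List.findIdx?, List.findIdx?.go, List.find?,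
      e1,f1,e2,f2,e3,f3,e4,f4,e5,f5,e6,f6,e7,f7,e8,f8,e9,f9,e10,f10,e11,f11,e12,f12,e13,f13,e14,f14,e15,f15,e16,f16,e17,f17,e18,f18,e19,f19,e20,f20,e21,f21]

-- ===== VERDICT (by name: the statement is the Claim_ definition above) =====
theorem get_pitch_class_color_spec : Claim_equal_get_pitch_class_color := by
  intro note _
  unfold Spec_get_pitch_class_color get_pitch_class_color get_pitch_class_color_alt
  exact core (stripTrailingDigits note)
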